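-- pv_equiv track=rewrite | github.com/lkwinta/wdi | Workspace/Zestaw_2/zad7.py | czy_wielokrotnosc
-- ===== SOURCE A (Python) =====
-- def czy_wielokrotnosc(x : int):
--     an = 3
--     n = 1
--     while an <= x:
--         if x % an == 0:
--             return True
--         n += 1
--         an = n*n + n + 1
--
--     return False
-- ===== SOURCE B (Python) =====
-- def _cp(d):
--     # is d = n*n + n + 1 for some n >= 1?  (find the least n with n*n+n+1 >= d)
--     n = 1
--     while n*n + n + 1 < d:
--         n += 1
--     return n*n + n + 1 == d
--
-- def czy_wielokrotnosc(x : int):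
--     # enumerate divisor pairs of x by trial division, test each for the shape n*n+n+1
--     if x < 3:
--         return False
--     i = 1
--     while i * i <= x:
--         if x % i == 0 and (_cp(i) or _cp(x // i)):
--             return True
--         i += 1
--     return False
-- ===== Notes on version B (the rewrite author's own statement) =====
-- stated objective: alternative
-- what changed: B enumerates the actual divisor pairs of x by trial division up to sqrt(x) and tests each divisor for the shape n*n+n+1 (via the least n with n*n+n+1 >= d), instead of A's scan over candidate values n*n+n+1 testing x % candidate.
import Mathlib
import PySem

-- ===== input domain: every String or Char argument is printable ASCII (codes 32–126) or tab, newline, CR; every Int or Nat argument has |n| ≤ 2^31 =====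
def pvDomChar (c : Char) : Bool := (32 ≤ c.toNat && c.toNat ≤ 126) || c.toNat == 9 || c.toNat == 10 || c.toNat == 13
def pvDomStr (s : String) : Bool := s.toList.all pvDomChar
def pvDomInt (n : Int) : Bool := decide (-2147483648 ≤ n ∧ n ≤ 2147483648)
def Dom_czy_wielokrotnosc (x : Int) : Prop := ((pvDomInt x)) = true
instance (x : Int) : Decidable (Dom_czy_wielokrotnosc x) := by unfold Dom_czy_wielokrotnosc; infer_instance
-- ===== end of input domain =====

-- B enumerates the divisor pairs of x by trial division and tests each divisor for the
-- shape n*n+n+1, instead of A's scan over candidates n*n+n+1 testing x % candidate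
-- (alternative algorithm, same value everywhere).


-- ===== PORT A =====
-- while an <= x: if x % an == 0: return True; n += 1; an = n*n+n+1
def pyLoopA (x n : Int) : Bool :=
  if n * n + n + 1 ≤ x then
    if PySem.Int.mod x (n * n + n + 1) = 0 then true
    else pyLoopA x (n + 1)
  else false
termination_by (x + 1 - n).toNat
decreasing_by
  have h2 : 0 ≤ n * n := mul_self_nonneg n
  omega

def czy_wielokrotnosc (x : Int) : Bool := pyLoopA x 1

-- ===== PORT B =====
-- _cp: n = 1; while n*n+n+1 < d: n += 1; return n*n+n+1 == d
def cpLoop (d n : Int) : Int :=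
  if n * n + n + 1 < d then cpLoop d (n + 1) else n
termination_by (d - n).toNat
decreasing_by
  have h2 : 0 ≤ n * n := mul_self_nonneg n
  omega

def cpB (d : Int) : Bool :=
  let n := cpLoop d 1
  n * n + n + 1 == d

-- i = 1; while i*i <= x: if x % i == 0 and (_cp(i) or _cp(x//i)): return True; i += 1
def pyLoopB (x i : Int) : Bool :=
  if i * i ≤ x then
    if PySem.Int.mod x i = 0 ∧ (cpB i = true ∨ cpB (PySem.Int.floordiv x i) = true) then true
    else pyLoopB x (i + 1)
  else false
termination_by (x + 1 - i).toNat
decreasing_by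
  have h2 : i ≤ i * i := by nlinarith [mul_self_nonneg i, mul_self_nonneg (i - 1)]
  omega

def czy_wielokrotnosc_alt (x : Int) : Bool :=
  if x < 3 then false else pyLoopB x 1

-- ===== PRECONDITION & SPEC =====
def Spec_czy_wielokrotnosc (x : Int) (out : Bool) : Prop := out = czy_wielokrotnosc_alt x
instance (x : Int) (out : Bool) : Decidable (Spec_czy_wielokrotnosc x out) := by unfold Spec_czy_wielokrotnosc; infer_instance

-- ===== CLAIM (what is proved, stated in full; the proofs are below) =====
def Claim_equal_czy_wielokrotnosc : Prop := ∀ (x : Int), Dom_czy_wielokrotnosc x → Spec_czy_wielokrotnosc x (czy_wielokrotnosc x)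

-- ===== LEMMAS AND PROOFS =====

-- monotonicity of f n = n*n+n+1 on n ≥ 1
theorem fmono {n m : Int} (hn : 1 ≤ n) (hnm : n ≤ m) :
    n * n + n + 1 ≤ m * m + m + 1 := by nlinarith

theorem finj {n m : Int} (hn : 1 ≤ n) (hm : 1 ≤ m)
    (h : n * n + n + 1 = m * m + m + 1) : n = m := by nlinarith

-- A's loop searches for some m ≥ n with f m ≤ x dividing x
theorem pyLoopA_iff (x n : Int) (hn : 1 ≤ n) :
    pyLoopA x n = true ↔
      ∃ m : Int, n ≤ m ∧ m * m + m + 1 ≤ x ∧ PySem.Int.mod x (m * m + m + 1) = 0 := by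
  induction n using pyLoopA.induct (x := x) with
  | case1 n hle hmod =>
    rw [pyLoopA, if_pos hle, if_pos hmod]
    exact ⟨fun _ => ⟨n, le_refl n, hle, hmod⟩, fun _ => rfl⟩
  | case2 n hle hmod ih =>
    rw [pyLoopA, if_pos hle, if_neg hmod]
    rw [ih (by omega)]
    constructor
    · rintro ⟨m, h1, h2, h3⟩; exact ⟨m, by omega, h2, h3⟩
    · rintro ⟨m, h1, h2, h3⟩
      refine ⟨m, ?_, h2, h3⟩
      rcases lt_or_eq_of_le h1 with h | h
      · omega
      · subst h; exact absurd h3 hmod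
  | case3 n hle =>
    rw [pyLoopA, if_neg hle]
    simp only [Bool.false_eq_true, false_iff]
    rintro ⟨m, h1, h2, _⟩
    exact hle (le_trans (fmono hn h1) h2)

theorem cpLoop_ge (d n : Int) : n ≤ cpLoop d n := by
  induction n using cpLoop.induct (d := d) with
  | case1 n h ih => rw [cpLoop, if_pos h]; omega
  | case2 n h => rw [cpLoop, if_neg h]

theorem cpLoop_finds {d m : Int} (hm : 1 ≤ m) (hfm : m * m + m + 1 = d) :
    ∀ n : Int, 1 ≤ n → n ≤ m → cpLoop d n = m := by
  intro n
  induction n using cpLoop.induct (d := d) with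
  | case1 n h ih =>
    intro hn hnm
    rw [cpLoop, if_pos h]
    apply ih (by omega)
    rcases lt_or_eq_of_le hnm with h' | h'
    · omega
    · subst h'; omega
  | case2 n h =>
    intro hn hnm
    rw [cpLoop, if_neg h]
    have h1 : m * m + m + 1 ≤ n * n + n + 1 := by omega
    have h2 : n * n + n + 1 ≤ m * m + m + 1 := fmono hn hnm
    exact finj hn hm (le_antisymm h2 h1)

theorem cpB_iff (d : Int) : cpB d = true ↔ ∃ m : Int, 1 ≤ m ∧ m * m + m + 1 = d := by
  constructor
  · intro h
    refine ⟨cpLoop d 1, cpLoop_ge d 1, ?_⟩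
    simpa [cpB] using h
  · rintro ⟨m, hm, hfm⟩
    have := cpLoop_finds hm hfm 1 le_rfl hm
    simp [cpB, this, hfm]

theorem pyLoopB_iff (x i : Int) (hi : 1 ≤ i) :
    pyLoopB x i = true ↔
      ∃ j : Int, i ≤ j ∧ j * j ≤ x ∧ PySem.Int.mod x j = 0 ∧
        (cpB j = true ∨ cpB (PySem.Int.floordiv x j) = true) := by
  induction i using pyLoopB.induct (x := x) with
  | case1 i hle hcond =>
    rw [pyLoopB, if_pos hle, if_pos hcond]
    exact ⟨fun _ => ⟨i, le_refl i, hle, hcond.1, hcond.2⟩, fun _ => rfl⟩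
  | case2 i hle hcond ih =>
    rw [pyLoopB, if_pos hle, if_neg hcond]
    rw [ih (by omega)]
    constructor
    · rintro ⟨j, h1, h2, h3, h4⟩; exact ⟨j, by omega, h2, h3, h4⟩
    · rintro ⟨j, h1, h2, h3, h4⟩
      refine ⟨j, ?_, h2, h3, h4⟩
      rcases lt_or_eq_of_le h1 with h | h
      · omega
      · subst h; exact absurd ⟨h3, h4⟩ hcond
  | case3 i hle =>
    rw [pyLoopB, if_neg hle]
    simp only [Bool.false_eq_true, false_iff]
    rintro ⟨j, h1, h2, _, _⟩
    have : i * i ≤ j * j := by nlinarith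
    exact hle (le_trans this h2)

-- the common mathematical content: x ≥ 3 has a divisor of the shape m*m+m+1, m ≥ 1
theorem A_iff (x : Int) (hx : 3 ≤ x) :
    czy_wielokrotnosc x = true ↔ ∃ m : Int, 1 ≤ m ∧ (m * m + m + 1) ∣ x := by
  rw [czy_wielokrotnosc, pyLoopA_iff x 1 le_rfl]
  constructor
  · rintro ⟨m, h1, _, h3⟩
    exact ⟨m, h1, (PySem.Int.mod_eq_zero_iff_dvd x (m * m + m + 1)).mp h3⟩
  · rintro ⟨m, h1, hdvd⟩
    refine ⟨m, h1, Int.le_of_dvd (by omega) hdvd, (PySem.Int.mod_eq_zero_iff_dvd _ _).mpr hdvd⟩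

theorem B_iff (x : Int) (hx : 3 ≤ x) :
    czy_wielokrotnosc_alt x = true ↔ ∃ m : Int, 1 ≤ m ∧ (m * m + m + 1) ∣ x := by
  rw [czy_wielokrotnosc_alt, if_neg (by omega), pyLoopB_iff x 1 le_rfl]
  constructor
  · rintro ⟨j, h1, h2, h3, h4⟩
    have hjdvd : j ∣ x := (PySem.Int.mod_eq_zero_iff_dvd x j).mp h3
    rcases h4 with h4 | h4
    · rcases (cpB_iff j).mp h4 with ⟨m, hm, hfm⟩
      exact ⟨m, hm, hfm ▸ hjdvd⟩
    · rw [PySem.Int.floordiv_eq_ediv_of_pos (by omega)] at h4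
      rcases (cpB_iff _).mp h4 with ⟨m, hm, hfm⟩
      have hc : x / j ∣ x := ⟨j, (Int.ediv_mul_cancel hjdvd).symm⟩
      exact ⟨m, hm, hfm ▸ hc⟩
  · rintro ⟨m, hm, hdvd⟩
    set d := m * m + m + 1 with hd
    have hd3 : 3 ≤ d := by nlinarith
    have hdx : d ≤ x := Int.le_of_dvd (by omega) hdvd
    have hshape : cpB d = true := (cpB_iff d).mpr ⟨m, hm, rfl⟩
    set c := x / d with hc
    have hcd : d * c = x := Int.mul_ediv_cancel' hdvd
    have hc1 : 1 ≤ c := by nlinarith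
    by_cases hsq : d * d ≤ x
    · exact ⟨d, by omega, hsq, (PySem.Int.mod_eq_zero_iff_dvd x d).mpr hdvd,
        Or.inl hshape⟩
    · rw [not_le] at hsq
      have hcd' : c < d := by nlinarith
      have hcdvd : c ∣ x := ⟨d, by linarith [hcd, mul_comm d c]⟩
      have hxc : x / c = d := by
        rw [← hcd, mul_comm]; exact Int.mul_ediv_cancel_left d (by omega)
      refine ⟨c, hc1, by nlinarith, (PySem.Int.mod_eq_zero_iff_dvd x c).mpr hcdvd, Or.inr ?_⟩
      rw [PySem.Int.floordiv_eq_ediv_of_pos (by omega), hxc]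
      exact hshape

theorem A_small (x : Int) (hx : x < 3) : czy_wielokrotnosc x = false := by
  rw [czy_wielokrotnosc, pyLoopA]
  norm_num
  omega

-- ===== VERDICT (by name: the statement is the Claim_ definition above) =====
theorem czy_wielokrotnosc_spec : Claim_equal_czy_wielokrotnosc := by
  intro x _
  unfold Spec_czy_wielokrotnosc
  by_cases hx : x < 3
  · rw [A_small x hx, czy_wielokrotnosc_alt, if_pos hx]
  · rw [not_lt] at hx
    rcases hA : czy_wielokrotnosc x with h | h
    · rcases hB : czy_wielokrotnosc_alt x with h' | h'
      · rfl
      · exact absurd ((A_iff x hx).mpr ((B_iff x hx).mp hB)) (by simp [hA])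
    · exact ((B_iff x hx).mpr ((A_iff x hx).mp hA)).symm
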